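-- pv_equiv track=rewrite | github.com/pypi-data/pypi-mirror-42 | packages/nadaprafazer/nadaprafazer-0.1.tar.gz/nadaprafazer-0.1/nadaprafazer/web.py | _escape_chars
-- ===== SOURCE A (Python) =====
-- def _escape_chars(entry):
--     for k, v in entry.items():
--         try:
--             entry[k] = v.replace('&', '&amp').replace('<', '&lt').replace(
--                 '>', '&gt')
--         except AttributeError:
--             # something that is not a string...
--             pass
--     return entry
-- ===== SOURCE B (Python) =====
-- _ESC = {'&': '&amp', '<': '&lt', '>': '&gt'}
--
--
-- def _escape_chars(entry):
--     entry.update({k: ''.join(_ESC.get(c, c) for c in v)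
--                   for k, v in entry.items() if isinstance(v, str)})
--     return entry
-- ===== Notes on version B (the rewrite author's own statement) =====
-- stated objective: idiomatic
-- what changed: Replaces the in-place loop of three chained substring .replace passes with a dict comprehension that rebuilds each value in a single character-wise pass (join over a per-character escape-table lookup) and merges it back with dict.update, filtering non-strings with isinstance instead of try/except.
import Mathlib
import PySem

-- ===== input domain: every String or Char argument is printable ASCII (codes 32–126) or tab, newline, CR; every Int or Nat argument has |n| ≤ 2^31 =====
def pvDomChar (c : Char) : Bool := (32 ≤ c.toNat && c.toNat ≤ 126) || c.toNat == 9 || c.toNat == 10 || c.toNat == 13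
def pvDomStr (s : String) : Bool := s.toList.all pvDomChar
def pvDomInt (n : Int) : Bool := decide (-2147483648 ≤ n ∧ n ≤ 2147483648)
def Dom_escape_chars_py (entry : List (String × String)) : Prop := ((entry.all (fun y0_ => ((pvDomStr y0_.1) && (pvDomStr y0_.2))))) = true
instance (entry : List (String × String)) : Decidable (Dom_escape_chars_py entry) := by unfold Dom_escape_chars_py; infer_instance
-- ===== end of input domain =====

-- B rebuilds each value in ONE character-wise pass (join over an escape-table lookup) inside a
-- dict comprehension merged back with dict.update, instead of A's loop of three chained .replace
-- passes with try/except. Equivalence is about the RETURN value: Python A mutates the dict in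
-- place (B's update performs the same mutation).

-- ===== PORT A =====
-- for k, v in entry.items(): entry[k] = v.replace('&','&amp').replace('<','&lt').replace('>','&gt')
-- keys are unchanged, so the in-place value updates over the dict's items are the map below
def escape_chars_py (entry : List (String × String)) : List (String × String) :=
  entry.map (fun kv =>
    (kv.1, PySem.Str.replace (PySem.Str.replace (PySem.Str.replace kv.2 "&" "&amp") "<" "&lt") ">" "&gt"))

-- ===== PORT B =====
-- the escape table _ESC
def escDict : PySem.Dict Char String :=
  PySem.Dict.ofList [('&', "&amp"), ('<', "&lt"), ('>', "&gt")]

-- {k: ''.join(_ESC.get(c, c) for c in v) for k, v in entry.items() if isinstance(v, str)} merged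
-- back with entry.update: every value here is a string, and update with the existing keys
-- overwrites each value in place, so the result is the map below
def escape_chars_py_alt (entry : List (String × String)) : List (String × String) :=
  entry.map (fun kv =>
    (kv.1, String.ofList ((kv.2.toList.map (fun c => (escDict.getD c (String.ofList [c])).toList)).flatten)))

-- ===== PRECONDITION & SPEC =====
def Spec_escape_chars_py (entry : List (String × String)) (out : List (String × String)) : Prop := out = escape_chars_py_alt entry
instance (entry : List (String × String)) (out : List (String × String)) : Decidable (Spec_escape_chars_py entry out) := by unfold Spec_escape_chars_py; infer_instance

-- ===== CLAIM (what is proved, stated in full; the proofs are below) =====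
def Claim_equal_escape_chars_py : Prop := ∀ (entry : List (String × String)), Dom_escape_chars_py entry → Spec_escape_chars_py entry (escape_chars_py entry)

-- ===== LEMMAS AND PROOFS =====

-- the table lookup, characterised by cases on the character
theorem escLookup_eq (c : Char) :
    (escDict.getD c (String.ofList [c])).toList
      = if c = '&' then "&amp".toList
        else if c = '<' then "&lt".toList
        else if c = '>' then "&gt".toList
        else [c] := by
  by_cases h1 : c = '&'
  · subst h1; decide
  · by_cases h2 : c = '<'
    · subst h2; decide
    · by_cases h3 : c = '>'
      · subst h3; decide
      · have b1 : ('&' == c) = false := by simp [Ne.symm h1]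
        have b2 : ('<' == c) = false := by simp [Ne.symm h2]
        have b3 : ('>' == c) = false := by simp [Ne.symm h3]
        simp [escDict, PySem.Dict.getD, PySem.Dict.get?, PySem.Dict.ofList, PySem.Dict.update,
          PySem.Dict.empty, PySem.Dict.insert, h1, h2, h3, b1, b2, b3]

-- replacing a single character o is the character-wise flatMap
theorem replace_go_single (o : Char) (new : List Char) (l acc : List Char) (fuel : Nat)
    (h : l.length ≤ fuel) :
    PySem.Chars.replace.go [o] new fuel l acc
      = acc.reverse ++ l.flatMap (fun c => if c = o then new else [c]) := by
  induction l generalizing fuel acc with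
  | nil =>
    cases fuel <;> simp [PySem.Chars.replace.go]
  | cons c t ih =>
    cases fuel with
    | zero => simp at h
    | succ f =>
      simp only [List.length_cons, Nat.succ_le_succ_iff] at h
      simp only [PySem.Chars.replace.go, List.isPrefixOf, List.flatMap_cons]
      by_cases hc : o = c
      · subst hc
        simp only [beq_self_eq_true, Bool.true_and, if_true]
        rw [show List.drop [o].length (o :: t) = t from rfl,
          ih (new.reverse ++ acc) f h]
        simp
      · have : (o == c) = false := by simp [hc]
        simp only [this, Bool.false_and]
        rw [ih (c :: acc) f h]
        simp [Ne.symm hc]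

theorem replace_single (s : List Char) (o : Char) (new : List Char) :
    PySem.Chars.replace s [o] new = s.flatMap (fun c => if c = o then new else [c]) := by
  simpa using replace_go_single o new s [] s.length (le_refl _)

-- the three sequential single-character passes collapse into one table pass
theorem chain_eq_table (s : List Char) :
    (((s.flatMap (fun c => if c = '&' then "&amp".toList else [c])).flatMap
        (fun c => if c = '<' then "&lt".toList else [c])).flatMap
        (fun c => if c = '>' then "&gt".toList else [c]))
      = (s.map (fun c => (escDict.getD c (String.ofList [c])).toList)).flatten := by
  induction s with
  | nil => rfl
  | cons c t ih =>
    simp only [List.flatMap_cons, List.flatMap_append, List.map_cons, List.flatten_cons]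
    rw [ih]
    congr 1
    rw [escLookup_eq]
    by_cases h1 : c = '&'
    · subst h1; decide
    · by_cases h2 : c = '<'
      · subst h2; decide
      · by_cases h3 : c = '>'
        · subst h3; decide
        · simp [h1, h2, h3]

theorem per_string (v : String) :
    PySem.Str.replace (PySem.Str.replace (PySem.Str.replace v "&" "&amp") "<" "&lt") ">" "&gt"
      = String.ofList ((v.toList.map (fun c => (escDict.getD c (String.ofList [c])).toList)).flatten) := by
  rw [← String.toList_inj, PySem.Str.toList_replace, PySem.Str.toList_replace,
    PySem.Str.toList_replace, String.toList_ofList,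
    show ("<".toList) = ['<'] from rfl, show (">".toList) = ['>'] from rfl,
    replace_single, replace_single, replace_single, chain_eq_table, String.toList_ofList]

-- ===== VERDICT (by name: the statement is the Claim_ definition above) =====
theorem escape_chars_py_spec : Claim_equal_escape_chars_py := by
  intro entry _
  unfold Spec_escape_chars_py escape_chars_py escape_chars_py_alt
  simp only [per_string]
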